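-- pv_equiv track=rewrite | github.com/amadeusine/ChimeraX | src/hydra/commands.py | specifier_parts
-- ===== SOURCE A (Python) =====
-- def specifier_parts(spec):
--
--     parts = []
--     p = ''
--     for c in spec:
--         if c in ('#', '.', ':', '@') and p:
--             parts.append(p)
--             p = ''
--         p += c
--     if p:
--         parts.append(p)
--     return parts
-- ===== SOURCE B (Python) =====
-- def specifier_parts(spec):
--     # Scan-and-slice: jump from boundary to boundary and slice out each part,
--     # instead of accumulating characters one by one into a growing string.
--     parts = []
--     rest = spec
--     while rest:
--         j = 1
--         while j < len(rest) and rest[j] not in '#.:@':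
--             j += 1
--         parts.append(rest[:j])
--         rest = rest[j:]
--     return parts
-- ===== Notes on version B (the rewrite author's own statement) =====
-- stated objective: alternative
-- what changed: B jumps from boundary to boundary, scanning for the next marker and slicing out each part whole, instead of A's char-by-char accumulation into a growing string with flush-on-marker.
import Mathlib
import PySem

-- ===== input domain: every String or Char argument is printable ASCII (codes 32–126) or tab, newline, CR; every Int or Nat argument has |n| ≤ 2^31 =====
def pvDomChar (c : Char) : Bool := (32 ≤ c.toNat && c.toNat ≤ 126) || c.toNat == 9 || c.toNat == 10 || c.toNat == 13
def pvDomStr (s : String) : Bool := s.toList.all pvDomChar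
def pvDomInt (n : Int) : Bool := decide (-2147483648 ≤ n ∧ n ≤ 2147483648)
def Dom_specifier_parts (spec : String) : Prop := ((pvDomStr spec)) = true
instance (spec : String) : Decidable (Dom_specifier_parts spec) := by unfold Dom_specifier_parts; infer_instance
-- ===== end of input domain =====

-- B changes the decomposition: it jumps from boundary to boundary and slices out each
-- part, instead of A's char-by-char accumulation into a growing string (objective: alternative).

-- ===== PORT A =====
-- `c in ('#','.',':','@')`
def pyIsMarker (c : Char) : Bool := c == '#' || c == '.' || c == ':' || c == '@'

-- one iteration of A's for-loop: branch (marker and p nonempty) then `p += c`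
def aStep (st : List String × List Char) (c : Char) : List String × List Char :=
  let st' := if pyIsMarker c && !st.2.isEmpty
             then (st.1 ++ [String.mk st.2], ([] : List Char))
             else st
  (st'.1, st'.2 ++ [c])

def specifier_parts (spec : String) : List String :=
  let st := spec.toList.foldl aStep ([], [])
  if !st.2.isEmpty then st.1 ++ [String.mk st.2] else st.1

-- ===== PORT B =====
-- inner while loop of B: number of steps `j` advances past index 1, i.e. the count of
-- leading non-marker characters of the rest after its head
def bScan : List Char → Nat
  | [] => 0
  | c :: t => if pyIsMarker c then 0 else bScan t + 1

-- outer while loop of B: `rest` is a suffix of `spec` (string slices are exact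
-- take/drop on the char list), `parts` the accumulated output
def bLoop (parts : List String) : List Char → List String
  | [] => parts
  | c :: t =>
      let j := bScan t
      bLoop (parts ++ [String.mk (c :: t.take j)]) (t.drop j)
termination_by l => l.length
decreasing_by
  simpa using Nat.lt_succ_of_le (List.length_drop_le ..)

def specifier_parts_alt (spec : String) : List String := bLoop [] spec.toList

-- ===== PRECONDITION & SPEC =====
def Spec_specifier_parts (spec : String) (out : List String) : Prop := out = specifier_parts_alt spec
instance (spec : String) (out : List String) : Decidable (Spec_specifier_parts spec out) := by unfold Spec_specifier_parts; infer_instance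

-- ===== CLAIM (what is proved, stated in full; the proofs are below) =====
def Claim_equal_specifier_parts : Prop := ∀ (spec : String), Dom_specifier_parts spec → Spec_specifier_parts spec (specifier_parts spec)

-- ===== LEMMAS AND PROOFS =====

-- B's inner scan runs through a marker-free prefix and stops at the first marker (or the end)
theorem bScan_append (t r : List Char) (h : ∀ c ∈ t, pyIsMarker c = false) :
    bScan (t ++ r) = t.length + bScan r := by
  induction t with
  | nil => simp [bScan]
  | cons c t ih =>
      have hc := h c (List.mem_cons_self ..)
      simp [bScan, hc, ih (fun c hc => h c (List.mem_cons_of_mem _ hc))]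
      omega

theorem bScan_eq_length (t : List Char) (h : ∀ c ∈ t, pyIsMarker c = false) :
    bScan t = t.length := by
  simpa [bScan] using bScan_append t [] h

-- loop invariant: if A's running part `p` is nonempty and marker-free after its head,
-- finishing A's fold from state (parts, p) equals running B's loop on `p ++ l`
theorem key (l : List Char) (parts : List String) (p : List Char)
    (hp : p ≠ []) (hm : ∀ c ∈ p.drop 1, pyIsMarker c = false) :
    (let st := l.foldl aStep (parts, p);
     if !st.2.isEmpty then st.1 ++ [String.mk st.2] else st.1) = bLoop parts (p ++ l) := by
  induction l generalizing parts p with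
  | nil =>
      obtain ⟨a, t, rfl⟩ : ∃ a t, p = a :: t := by
        cases p with | nil => exact absurd rfl hp | cons a t => exact ⟨a, t, rfl⟩
      simp only [List.drop_one, List.tail_cons] at hm
      simp [bLoop, bScan_eq_length t hm, List.take_length, List.drop_length]
  | cons c l ih =>
      obtain ⟨a, t, rfl⟩ : ∃ a t, p = a :: t := by
        cases p with | nil => exact absurd rfl hp | cons a t => exact ⟨a, t, rfl⟩
      simp only [List.drop_one, List.tail_cons] at hm
      by_cases hc : pyIsMarker c = true
      · -- marker: A flushes p and restarts with [c]; B cuts the slice exactly at c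
        have hstep : aStep (parts, a :: t) c = (parts ++ [String.mk (a :: t)], [c]) := by
          simp [aStep, hc]
        have hscan : bScan (t ++ c :: l) = t.length := by
          rw [bScan_append t (c :: l) hm]; simp [bScan, hc]
        have := ih (parts ++ [String.mk (a :: t)]) [c] (by simp) (by simp)
        simp only [List.cons_append, List.foldl_cons, hstep]
        rw [this]
        have h1 : bLoop parts (a :: (t ++ c :: l))
            = bLoop (parts ++ [String.mk (a :: t)]) (c :: l) := by
          rw [bLoop]
          simp [hscan, List.take_left' rfl, List.drop_left' rfl]
        rw [h1]
        simp
      · -- non-marker: A appends c to p; B keeps scanning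
        have hstep : aStep (parts, a :: t) c = (parts, (a :: t) ++ [c]) := by
          simp [aStep, hc]
        have hm' : ∀ c' ∈ t ++ [c], pyIsMarker c' = false := by
          intro c' hc'
          rcases List.mem_append.mp hc' with h' | h'
          · exact hm c' h'
          · simp only [List.mem_singleton] at h'; subst h'
            exact eq_false_of_ne_true hc
        have := ih parts ((a :: t) ++ [c]) (by simp) (by simpa using hm')
        simp only [List.cons_append, List.foldl_cons, hstep]
        simpa [List.append_assoc] using this

-- ===== VERDICT (by name: the statement is the Claim_ definition above) =====
theorem specifier_parts_spec : Claim_equal_specifier_parts := by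
  intro spec _
  unfold Spec_specifier_parts specifier_parts specifier_parts_alt
  cases hl : spec.toList with
  | nil => simp [bLoop]
  | cons c t =>
      have hstep : aStep ([], []) c = ([], [c]) := by simp [aStep]
      have := key t [] [c] (by simp) (by simp)
      simp only [List.foldl_cons, hstep]
      simpa using this
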